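-- pv_equiv track=rewrite | github.com/rmasciarella/Vulcan_MES | apps/backend/app/tests/api/test_contract_validation.py | _matches_path_pattern
-- ===== SOURCE A (Python) =====
-- def _matches_path_pattern(actual_path: str, pattern: str) -> bool:
--     """Check if actual path matches OpenAPI path pattern."""
--     # Simple pattern matching - could be enhanced with regex
--     pattern_parts = pattern.split("/")
--     actual_parts = actual_path.split("/")
--
--     if len(pattern_parts) != len(actual_parts):
--         return False
--
--     for pattern_part, actual_part in zip(pattern_parts, actual_parts):
--         if pattern_part.startswith("{") and pattern_part.endswith("}"):
--             continue  # Path parameter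
--         if pattern_part != actual_part:
--             return False
--
--     return True
-- ===== SOURCE B (Python) =====
-- def _matches_path_pattern(actual_path: str, pattern: str) -> bool:
--     """Recursive-descent matcher: compare one segment at a time via str.partition,
--     never materializing the full split lists."""
--     p_seg, p_sep, p_rest = pattern.partition("/")
--     a_seg, a_sep, a_rest = actual_path.partition("/")
--     if p_sep != a_sep:
--         return False
--     if not ((p_seg.startswith("{") and p_seg.endswith("}")) or p_seg == a_seg):
--         return False
--     return (not p_sep) or _matches_path_pattern(a_rest, p_rest)
-- ===== Notes on version B (the rewrite author's own statement) =====
-- stated objective: alternative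
-- what changed: Replaces A's split-both-strings-into-lists then length-check + zip loop with a recursive-descent matcher that peels one segment at a time via str.partition, never materializing the split lists.
import Mathlib
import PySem

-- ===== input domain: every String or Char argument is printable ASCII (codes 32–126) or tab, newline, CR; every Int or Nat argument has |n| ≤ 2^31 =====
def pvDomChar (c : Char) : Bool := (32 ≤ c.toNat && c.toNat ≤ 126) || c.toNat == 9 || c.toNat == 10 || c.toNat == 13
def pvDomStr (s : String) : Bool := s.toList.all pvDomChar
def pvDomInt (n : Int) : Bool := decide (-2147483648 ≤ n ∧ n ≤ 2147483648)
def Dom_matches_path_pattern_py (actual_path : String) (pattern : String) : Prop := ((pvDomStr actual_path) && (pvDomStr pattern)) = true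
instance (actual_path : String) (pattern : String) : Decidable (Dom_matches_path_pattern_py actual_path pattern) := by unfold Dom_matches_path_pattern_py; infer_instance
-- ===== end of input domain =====

-- B replaces A's split-into-lists-then-zip loop by a recursive-descent matcher that
-- peels one segment at a time with str.partition (objective: alternative decomposition).

-- ===== PORT A =====
-- the for-loop with continue / early 'return False' over zip(pattern_parts, actual_parts)
def pvALoop : List (List Char × List Char) → Bool
  | [] => true
  | (p, a) :: rest =>
    if PySem.Chars.startswith p ['{'] && PySem.Chars.endswith p ['}'] then pvALoop rest
    else if p ≠ a then false
    else pvALoop rest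

def matches_path_pattern_py (actual_path : String) (pattern : String) : Bool :=
  let pattern_parts := PySem.Chars.splitOn pattern.toList ['/']
  let actual_parts := PySem.Chars.splitOn actual_path.toList ['/']
  if pattern_parts.length ≠ actual_parts.length then false
  else pvALoop (pattern_parts.zip actual_parts)

-- ===== PORT B =====
-- hand port of s.partition("/") for the 1-char separator "/" (exact: head = text before the
-- first '/', 'some rest' = text after it; 'none' encodes Python's ("", "") when '/' is absent)
def pvPartitionSlash : List Char → List Char × Option (List Char)
  | [] => ([], none)
  | c :: rest =>
    if c = '/' then ([], some rest)
    else
      let r := pvPartitionSlash rest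
      (c :: r.1, r.2)

theorem pvPartitionSlash_rest_lt (cs pr : List Char)
    (h : (pvPartitionSlash cs).2 = some pr) : pr.length < cs.length := by
  induction cs with
  | nil => simp [pvPartitionSlash] at h
  | cons c rest ih =>
    by_cases hc : c = '/'
    · simp [pvPartitionSlash, hc] at h; simp [← h]
    · simp [pvPartitionSlash, hc] at h
      exact Nat.lt_trans (ih h) (by simp)

-- '(p_seg.startswith("{") and p_seg.endswith("}")) or p_seg == a_seg'
def pvSegOk (p a : List Char) : Bool :=
  (PySem.Chars.startswith p ['{'] && PySem.Chars.endswith p ['}']) || p == a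

def pvAltGo (a p : List Char) : Bool :=
  match hp : (pvPartitionSlash p).2, (pvPartitionSlash a).2 with
  | none, none => pvSegOk (pvPartitionSlash p).1 (pvPartitionSlash a).1
  | some pr, some ar =>
    if pvSegOk (pvPartitionSlash p).1 (pvPartitionSlash a).1 then pvAltGo ar pr else false
  | _, _ => false
termination_by p.length
decreasing_by exact pvPartitionSlash_rest_lt p pr hp

def matches_path_pattern_py_alt (actual_path : String) (pattern : String) : Bool :=
  pvAltGo actual_path.toList pattern.toList

-- ===== PRECONDITION & SPEC =====
def Spec_matches_path_pattern_py (actual_path : String) (pattern : String) (out : Bool) : Prop := out = matches_path_pattern_py_alt actual_path pattern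
instance (actual_path : String) (pattern : String) (out : Bool) : Decidable (Spec_matches_path_pattern_py actual_path pattern out) := by unfold Spec_matches_path_pattern_py; infer_instance

-- ===== CLAIM (what is proved, stated in full; the proofs are below) =====
def Claim_equal_matches_path_pattern_py : Prop := ∀ (actual_path : String) (pattern : String), Dom_matches_path_pattern_py actual_path pattern → Spec_matches_path_pattern_py actual_path pattern (matches_path_pattern_py actual_path pattern)

-- ===== LEMMAS AND PROOFS =====

-- the recursive shape of Python's split("/")
def pvBSplit (cs : List Char) : List (List Char) :=
  match hr : (pvPartitionSlash cs).2 with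
  | none => [(pvPartitionSlash cs).1]
  | some rest => (pvPartitionSlash cs).1 :: pvBSplit rest
termination_by cs.length
decreasing_by exact pvPartitionSlash_rest_lt cs rest hr

theorem pvBSplit_none (cs : List Char) (h : (pvPartitionSlash cs).2 = none) :
    pvBSplit cs = [(pvPartitionSlash cs).1] := by
  rw [pvBSplit]; split <;> simp_all

theorem pvBSplit_some (cs r : List Char) (h : (pvPartitionSlash cs).2 = some r) :
    pvBSplit cs = (pvPartitionSlash cs).1 :: pvBSplit r := by
  rw [pvBSplit]; split <;> simp_all

theorem pvBSplit_ne_nil (cs : List Char) : pvBSplit cs ≠ [] := by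
  rcases h : (pvPartitionSlash cs).2 with _ | r
  · rw [pvBSplit_none cs h]; simp
  · rw [pvBSplit_some cs r h]; simp

theorem pvBSplit_slash (rest : List Char) :
    pvBSplit ('/' :: rest) = [] :: pvBSplit rest := by
  have h : (pvPartitionSlash ('/' :: rest)).2 = some rest := by simp [pvPartitionSlash]
  rw [pvBSplit_some _ _ h]; simp [pvPartitionSlash]

theorem pvBSplit_cons (c : Char) (rest : List Char) (hc : ¬ c = '/') :
    pvBSplit (c :: rest) = (pvBSplit rest).modifyHead (c :: ·) := by
  rcases hr : (pvPartitionSlash rest).2 with _ | r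
  · rw [pvBSplit_none (c :: rest) (by simp [pvPartitionSlash, hc, hr]),
        pvBSplit_none rest hr]
    simp [pvPartitionSlash, hc]
  · rw [pvBSplit_some (c :: rest) r (by simp [pvPartitionSlash, hc, hr]),
        pvBSplit_some rest r hr]
    simp [pvPartitionSlash, hc]

-- PySem.Chars.splitOn.go characterised on the 1-char separator '/'
theorem pvGo_eq (fuel : Nat) :
    ∀ (l cur : List Char) (acc : List (List Char)), l.length ≤ fuel →
      PySem.Chars.splitOn.go ['/'] fuel l cur acc =
        acc.reverse ++ (pvBSplit l).modifyHead (cur.reverse ++ ·) := by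
  induction fuel with
  | zero =>
    intro l cur acc h
    have : l = [] := List.length_eq_zero_iff.mp (Nat.le_zero.mp h)
    subst this
    rw [pvBSplit_none [] (by simp [pvPartitionSlash])]
    simp [PySem.Chars.splitOn.go, pvPartitionSlash]
  | succ n ih =>
    intro l cur acc h
    match l with
    | [] =>
      rw [pvBSplit_none [] (by simp [pvPartitionSlash])]
      simp [PySem.Chars.splitOn.go, pvPartitionSlash]
    | c :: rest =>
      by_cases hc : c = '/'
      · subst hc
        have hpre : List.isPrefixOf ['/'] ('/' :: rest) = true := by
          simp [List.isPrefixOf]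
        rw [PySem.Chars.splitOn.go]
        simp only [hpre, if_true, List.length_cons, List.length_nil, List.drop_succ_cons,
          List.drop_zero]
        rw [ih rest [] (cur.reverse :: acc) (by simpa using Nat.le_of_succ_le_succ h)]
        rw [pvBSplit_slash]
        rcases hnil : pvBSplit rest with _ | ⟨x, xs⟩
        · exact absurd hnil (pvBSplit_ne_nil rest)
        · simp
      · have hpre : List.isPrefixOf ['/'] (c :: rest) = false := by
          simp only [List.isPrefixOf, Bool.and_eq_false_iff, beq_eq_false_iff_ne, ne_eq]
          exact Or.inl fun h => hc h.symm
        rw [PySem.Chars.splitOn.go]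
        simp only [hpre, Bool.false_eq_true, if_false]
        rw [ih rest (c :: cur) acc (by simpa using Nat.le_of_succ_le_succ h)]
        rw [pvBSplit_cons c rest hc]
        rcases hnil : pvBSplit rest with _ | ⟨x, xs⟩
        · exact absurd hnil (pvBSplit_ne_nil rest)
        · simp

theorem pvSplitOn_eq_bsplit (cs : List Char) :
    PySem.Chars.splitOn cs ['/'] = pvBSplit cs := by
  have := pvGo_eq (cs.length + 1) cs [] [] (Nat.le_succ _)
  rw [PySem.Chars.splitOn, this]
  rcases hnil : pvBSplit cs with _ | ⟨x, xs⟩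
  · exact absurd hnil (pvBSplit_ne_nil cs)
  · simp

theorem pvALoop_cons (p a : List Char) (rest : List (List Char × List Char)) :
    pvALoop ((p, a) :: rest) = if pvSegOk p a then pvALoop rest else false := by
  conv_lhs => rw [pvALoop.eq_def]
  unfold pvSegOk
  by_cases h1 : (PySem.Chars.startswith p ['{'] && PySem.Chars.endswith p ['}']) = true
  · simp only [h1]; simp
  · by_cases h2 : p = a <;> simp_all

-- unfolding lemmas for B's recursion
theorem pvAltGo_nn (a p : List Char) (hp : (pvPartitionSlash p).2 = none)
    (ha : (pvPartitionSlash a).2 = none) :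
    pvAltGo a p = pvSegOk (pvPartitionSlash p).1 (pvPartitionSlash a).1 := by
  rw [pvAltGo]; split <;> simp_all

theorem pvAltGo_ss (a p pr ar : List Char) (hp : (pvPartitionSlash p).2 = some pr)
    (ha : (pvPartitionSlash a).2 = some ar) :
    pvAltGo a p =
      (if pvSegOk (pvPartitionSlash p).1 (pvPartitionSlash a).1 then pvAltGo ar pr
       else false) := by
  rw [pvAltGo]; split <;> simp_all

theorem pvAltGo_ns (a p ar : List Char) (hp : (pvPartitionSlash p).2 = none)
    (ha : (pvPartitionSlash a).2 = some ar) : pvAltGo a p = false := by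
  rw [pvAltGo]; split <;> simp_all

theorem pvAltGo_sn (a p pr : List Char) (hp : (pvPartitionSlash p).2 = some pr)
    (ha : (pvPartitionSlash a).2 = none) : pvAltGo a p = false := by
  rw [pvAltGo]; split <;> simp_all

-- the heart: B's recursive descent equals A's length-check + zip loop over the splits
theorem pvAltGo_eq_aux (n : Nat) : ∀ (p : List Char), p.length ≤ n → ∀ (a : List Char),
    pvAltGo a p =
      (if (pvBSplit p).length ≠ (pvBSplit a).length then false
       else pvALoop ((pvBSplit p).zip (pvBSplit a))) := by
  induction n with
  | zero =>
    intro p hp a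
    have hpn : p = [] := List.length_eq_zero_iff.mp (Nat.le_zero.mp hp)
    subst hpn
    have hp0 : (pvPartitionSlash ([] : List Char)).2 = none := by simp [pvPartitionSlash]
    rcases ha : (pvPartitionSlash a).2 with _ | ar
    · rw [pvAltGo_nn a [] hp0 ha, pvBSplit_none [] hp0, pvBSplit_none a ha]
      simp [pvALoop_cons, pvALoop]
    · rw [pvAltGo_ns a [] ar hp0 ha, pvBSplit_none [] hp0, pvBSplit_some a ar ha]
      have h1 : 1 ≤ (pvBSplit ar).length := List.length_pos_iff.mpr (pvBSplit_ne_nil ar)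
      have h2 : ([(pvPartitionSlash ([]:List Char)).1]).length ≠ ((pvPartitionSlash a).1 :: pvBSplit ar).length := by
        simp only [List.length_cons, List.length_nil]; omega
      rw [if_pos h2]
  | succ n ih =>
    intro p hp a
    rcases hpr : (pvPartitionSlash p).2 with _ | pr <;>
      rcases har : (pvPartitionSlash a).2 with _ | ar
    · rw [pvAltGo_nn a p hpr har, pvBSplit_none p hpr, pvBSplit_none a har]
      simp [pvALoop_cons, pvALoop]
    · rw [pvAltGo_ns a p ar hpr har, pvBSplit_none p hpr, pvBSplit_some a ar har]
      have h1 : 1 ≤ (pvBSplit ar).length := List.length_pos_iff.mpr (pvBSplit_ne_nil ar)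
      have h2 : ([(pvPartitionSlash p).1]).length ≠ ((pvPartitionSlash a).1 :: pvBSplit ar).length := by
        simp only [List.length_cons, List.length_nil]; omega
      rw [if_pos h2]
    · rw [pvAltGo_sn a p pr hpr har, pvBSplit_some p pr hpr, pvBSplit_none a har]
      have h1 : 1 ≤ (pvBSplit pr).length := List.length_pos_iff.mpr (pvBSplit_ne_nil pr)
      have h2 : (((pvPartitionSlash p).1 :: pvBSplit pr)).length ≠ ([(pvPartitionSlash a).1]).length := by
        simp only [List.length_cons, List.length_nil]; omega
      rw [if_pos h2]
    · rw [pvAltGo_ss a p pr ar hpr har, pvBSplit_some p pr hpr, pvBSplit_some a ar har]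
      have hlt : pr.length ≤ n :=
        Nat.le_of_lt_succ (Nat.lt_of_lt_of_le (pvPartitionSlash_rest_lt p pr hpr) hp)
      rw [ih pr hlt ar]
      simp only [List.zip_cons_cons, pvALoop_cons, List.length_cons]
      by_cases hs : pvSegOk (pvPartitionSlash p).1 (pvPartitionSlash a).1 = true
      · simp only [hs, if_true]
        by_cases hl : (pvBSplit pr).length = (pvBSplit ar).length <;> simp [hl]
      · simp only [Bool.not_eq_true] at hs
        simp only [hs, Bool.false_eq_true, if_false]
        by_cases hl : (pvBSplit pr).length = (pvBSplit ar).length <;> simp [hl]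

-- ===== VERDICT (by name: the statement is the Claim_ definition above) =====
theorem matches_path_pattern_py_spec : Claim_equal_matches_path_pattern_py := by
  intro actual_path pattern _
  unfold Spec_matches_path_pattern_py matches_path_pattern_py matches_path_pattern_py_alt
  rw [pvSplitOn_eq_bsplit, pvSplitOn_eq_bsplit,
    pvAltGo_eq_aux pattern.toList.length pattern.toList (Nat.le_refl _) actual_path.toList]
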